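-- pv_equiv track=rewrite | github.com/wensby/advent-of-code | python/2019_10_1.py | calc_visible_asteroids_from
-- ===== SOURCE A (Python) =====
-- from copy import deepcopy
-- from math import gcd
--
-- def calc_visible_asteroids_from(pos, field):
--   visible_asteroids = deepcopy(field)
--   for row in range(len(visible_asteroids)):
--     for col in range(len(visible_asteroids[row])):
--       if visible_asteroids[row][col]:
--         if (col, row) == pos:
--           visible_asteroids[row][col] = False
--         else:
--           delta = (col-pos[0], row-pos[1])
--           normalized_delta = normalize(delta)
--           darken_from((col, row), visible_asteroids, normalized_delta)
--   return sum(map(lambda x: x.count(True), visible_asteroids))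
--
-- def darken_from(pos, field, delta):
--   pos = (pos[0]+delta[0], pos[1]+delta[1])
--   while is_inside(pos, field):
--     field[pos[1]][pos[0]] = False
--     pos = (pos[0]+delta[0], pos[1]+delta[1])
--
-- def is_inside(pos, field):
--   col = pos[0]
--   row = pos[1]
--   return row >= 0 and row < len(field) and col >= 0 and col < len(field[row])
--
-- def normalize(delta):
--   if delta[0] and not delta[1]:
--     return (delta[0]//abs(delta[0]), delta[1])
--   elif delta[1] and not delta[0]:
--     return (delta[0], delta[1]//abs(delta[1]))
--   else:
--     divisor = gcd(delta[0], delta[1])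
--     return (delta[0]//abs(divisor), delta[1]//abs(divisor))
-- ===== SOURCE B (Python) =====
-- from math import gcd
--
-- def calc_visible_asteroids_from(pos, field):
--   # Per-asteroid visibility test: walk from the asteroid back toward pos along its
--   # normalized direction; it is visible unless the walk meets another asteroid first.
--   count = 0
--   for r, row in enumerate(field):
--     for c, val in enumerate(row):
--       if val and (c, r) != pos:
--         g = gcd(c - pos[0], r - pos[1])
--         dx, dy = (c - pos[0]) // g, (r - pos[1]) // g
--         qc, qr = c - dx, r - dy
--         while _inside(qc, qr, field) and (qc, qr) != (pos[0], pos[1]):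
--           if field[qr][qc]:
--             break
--           qc, qr = qc - dx, qr - dy
--         else:
--           count += 1
--   return count
--
-- def _inside(qc, qr, field):
--   return 0 <= qr < len(field) and 0 <= qc < len(field[qr])
-- ===== Notes on version B (the rewrite author's own statement) =====
-- stated objective: alternative
-- what changed: A deep-copies the grid and, for every asteroid, mutates the copy by darkening every cell along the outgoing ray, then counts surviving cells; B never copies or mutates anything and instead tests each asteroid directly by walking backwards toward pos along its normalized direction, stopping at the first blocking asteroid (early exit), counting as it scans.
import Mathlib
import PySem

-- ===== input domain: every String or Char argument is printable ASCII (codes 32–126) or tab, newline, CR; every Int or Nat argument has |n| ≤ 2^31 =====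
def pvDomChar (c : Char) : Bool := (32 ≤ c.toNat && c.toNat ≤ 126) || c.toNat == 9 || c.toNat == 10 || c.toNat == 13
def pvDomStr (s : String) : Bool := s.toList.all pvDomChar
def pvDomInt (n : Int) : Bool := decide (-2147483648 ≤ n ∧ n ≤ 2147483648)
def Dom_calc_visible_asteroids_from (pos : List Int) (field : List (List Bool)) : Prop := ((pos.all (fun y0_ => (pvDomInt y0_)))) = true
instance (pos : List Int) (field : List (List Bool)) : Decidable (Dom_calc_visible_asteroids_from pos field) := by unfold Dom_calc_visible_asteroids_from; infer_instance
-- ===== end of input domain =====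

-- B replaces A's darken-the-whole-copied-grid simulation by a per-asteroid backward
-- ray walk that stops at the first blocking asteroid (objective: alternative).

-- ===== PORT A =====
-- normalize(delta)
def pvNormalize (d : Int × Int) : Int × Int :=
  if d.1 ≠ 0 ∧ d.2 = 0 then (PySem.Int.floordiv d.1 |d.1|, d.2)
  else if d.2 ≠ 0 ∧ d.1 = 0 then (d.1, PySem.Int.floordiv d.2 |d.2|)
  else
    let g : Int := (Int.gcd d.1 d.2 : Int)
    (PySem.Int.floordiv d.1 |g|, PySem.Int.floordiv d.2 |g|)

-- is_inside(pos, field)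
def pvIsInside (p : Int × Int) (field : List (List Bool)) : Bool :=
  decide (0 ≤ p.2) && decide (p.2 < (field.length : Int)) && decide (0 ≤ p.1) &&
    decide (p.1 < (((field.getD p.2.toNat []).length : Int)))

-- field[pos[1]][pos[0]] = False   (only applied at in-range positions)
def pvSetFalse (field : List (List Bool)) (p : Int × Int) : List (List Bool) :=
  field.set p.2.toNat ((field.getD p.2.toNat []).set p.1.toNat false)

-- darken_from(pos, field, delta): the while loop, totalised with fuel (the caller
-- passes a fuel that provably exceeds the number of iterations)
def pvDarkenFrom (p : Int × Int) (field : List (List Bool)) (delta : Int × Int) : Nat → List (List Bool)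
  | 0 => field
  | fuel+1 =>
      let q := (p.1 + delta.1, p.2 + delta.2)
      if pvIsInside q field then pvDarkenFrom q (pvSetFalse field q) delta fuel else field

-- fuel bound for the while loops: rows + max row width + 2
def pvFuel (field : List (List Bool)) : Nat :=
  field.length + field.foldl (fun m r => max m r.length) 0 + 2

def calc_visible_asteroids_from (pos : List Int) (field : List (List Bool)) : Int :=
  let fuel := pvFuel field
  let va := (List.range field.length).foldl (fun va row =>
    (List.range (va.getD row []).length).foldl (fun va col =>
      if (va.getD row []).getD col false then
        -- Python compares the tuple (col, row) with the tuple pos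
        if pos = [(col : Int), (row : Int)] then pvSetFalse va ((col : Int), (row : Int))
        else
          pvDarkenFrom ((col : Int), (row : Int)) va
            (pvNormalize ((col : Int) - (PySem.List.pyGet? pos 0).getD 0,
                          (row : Int) - (PySem.List.pyGet? pos 1).getD 0)) fuel
      else va) va) field
  va.foldl (fun s r => s + (r.count true : Int)) 0

-- ===== PORT B =====
-- _inside(qc, qr, field)
def pvInsideB (qc qr : Int) (field : List (List Bool)) : Bool :=
  decide (0 ≤ qr) && decide (qr < (field.length : Int)) && decide (0 ≤ qc) &&
    decide (qc < (((field.getD qr.toNat []).length : Int)))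

-- the backward while loop of B: true = visible (the loop was left without break)
def pvWalk (qc qr dx dy p0 p1 : Int) (field : List (List Bool)) : Nat → Bool
  | 0 => true
  | fuel+1 =>
      if pvInsideB qc qr field && !((qc, qr) == (p0, p1)) then
        if (field.getD qr.toNat []).getD qc.toNat false then false
        else pvWalk (qc - dx) (qr - dy) dx dy p0 p1 field fuel
      else true

def calc_visible_asteroids_from_alt (pos : List Int) (field : List (List Bool)) : Int :=
  -- pos[0]/pos[1] are read lazily in Source B; their values never change, so binding them
  -- once (total form, defaulted — the default is unreachable under Pre_) is value-equal
  let p0 := (PySem.List.pyGet? pos 0).getD 0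
  let p1 := (PySem.List.pyGet? pos 1).getD 0
  let fuel := field.length + field.foldl (fun m r => max m r.length) 0 + 2
  (PySem.List.enumerate field 0).foldl (fun count rrow =>
    (PySem.List.enumerate rrow.2 0).foldl (fun count cv =>
      -- Python compares the tuple (c, r) with the tuple pos
      if cv.2 && !(pos == [cv.1, rrow.1]) then
        count +
          (if pvWalk (cv.1 - PySem.Int.floordiv (cv.1 - p0) ((Int.gcd (cv.1 - p0) (rrow.1 - p1) : Nat) : Int))
                     (rrow.1 - PySem.Int.floordiv (rrow.1 - p1) ((Int.gcd (cv.1 - p0) (rrow.1 - p1) : Nat) : Int))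
                     (PySem.Int.floordiv (cv.1 - p0) ((Int.gcd (cv.1 - p0) (rrow.1 - p1) : Nat) : Int))
                     (PySem.Int.floordiv (rrow.1 - p1) ((Int.gcd (cv.1 - p0) (rrow.1 - p1) : Nat) : Int))
                     p0 p1 field fuel then 1 else 0)
      else count) count) 0

-- ===== PRECONDITION & SPEC =====
-- in-range asteroid test used by Pre_
def pvCellAt (field : List (List Bool)) (c r : Int) : Bool :=
  decide (0 ≤ r) && decide (r < (field.length : Int)) && decide (0 ≤ c) &&
    decide (c < (((field.getD r.toNat []).length : Int))) && (field.getD r.toNat []).getD c.toNat false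

-- Pre_ excludes exactly the inputs on which Python A raises: IndexError (pos shorter
-- than 2 while the field holds an asteroid) and ZeroDivisionError (pos of length ≠ 2
-- aimed at an asteroid cell: the tuple-equality skip never fires and normalize gets (0,0)).
def Pre_calc_visible_asteroids_from (pos : List Int) (field : List (List Bool)) : Prop :=
  (2 ≤ pos.length ∨ field.all (fun row => row.all (fun v => !v)) = true) ∧
  (pos.length = 2 ∨ pvCellAt field ((PySem.List.pyGet? pos 0).getD 0) ((PySem.List.pyGet? pos 1).getD 0) = false)

instance (pos : List Int) (field : List (List Bool)) : Decidable (Pre_calc_visible_asteroids_from pos field) := by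
  unfold Pre_calc_visible_asteroids_from; infer_instance

def pvWitness_calc_visible_asteroids_from : List Int × List (List Bool) :=
  ([0, 1], [[true, true], [false, true]])

def Spec_calc_visible_asteroids_from (pos : List Int) (field : List (List Bool)) (out : Int) : Prop := out = calc_visible_asteroids_from_alt pos field
instance (pos : List Int) (field : List (List Bool)) (out : Int) : Decidable (Spec_calc_visible_asteroids_from pos field out) := by unfold Spec_calc_visible_asteroids_from; infer_instance

-- ===== CLAIM (what is proved, stated in full; the proofs are below) =====
def Claim_equal_calc_visible_asteroids_from : Prop := ∀ (pos : List Int) (field : List (List Bool)), Dom_calc_visible_asteroids_from pos field → Pre_calc_visible_asteroids_from pos field → Spec_calc_visible_asteroids_from pos field (calc_visible_asteroids_from pos field)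

-- ===== LEMMAS AND PROOFS =====

set_option maxHeartbeats 1000000

-- ---- proof-layer vocabulary ----

def pvP0 (pos : List Int) : Int := (PySem.List.pyGet? pos 0).getD 0
def pvP1 (pos : List Int) : Int := (PySem.List.pyGet? pos 1).getD 0

-- the k-th point of the ray leaving b in direction d
def pvRay (b d : Int × Int) (k : Nat) : Int × Int := (b.1 + (k : Int) * d.1, b.2 + (k : Int) * d.2)

-- "darken_from b in direction d reaches q": q is a later ray point and every ray point
-- up to q lies inside the field
def pvChain (field : List (List Bool)) (b d q : Int × Int) : Prop :=
  ∃ k : Nat, 1 ≤ k ∧ q = pvRay b d k ∧ ∀ i : Nat, 1 ≤ i → i ≤ k → pvIsInside (pvRay b d i) field = true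

-- the normalized direction from pos to b
def pvDOf (pos : List Int) (b : Int × Int) : Int × Int := pvNormalize (b.1 - pvP0 pos, b.2 - pvP1 pos)

-- q is darkened by some asteroid of S
def pvBlocked (pos : List Int) (field : List (List Bool)) (S : Int × Int → Prop) (q : Int × Int) : Prop :=
  ∃ b : Int × Int, S b ∧ pvCellAt field b.1 b.2 = true ∧ pos ≠ [b.1, b.2] ∧
    pvChain field b (pvDOf pos b) q

-- g has the same shape as field
def pvSh (field g : List (List Bool)) : Prop :=
  g.length = field.length ∧ ∀ i : Nat, (g.getD i []).length = (field.getD i []).length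

-- the invariant of A's main double loop; S = the set of already-processed cells
def pvInv (pos : List Int) (field : List (List Bool)) (S : Int × Int → Prop) (g : List (List Bool)) : Prop :=
  pvSh field g ∧ ∀ q : Int × Int,
    pvCellAt g q.1 q.2 = true ↔
      (pvCellAt field q.1 q.2 = true ∧ ¬(pos = [q.1, q.2] ∧ S q) ∧ ¬ pvBlocked pos field S q)

-- the cells processed before reaching row r, column c (row-major)
def pvProc (r c : Nat) (q : Int × Int) : Prop :=
  ∃ ri ci : Nat, q = ((ci : Int), (ri : Int)) ∧ (ri < r ∨ (ri = r ∧ ci < c))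

-- the j-th point walking backwards from s
def pvBack (s d : Int × Int) (j : Nat) : Int × Int := (s.1 - (j : Int) * d.1, s.2 - (j : Int) * d.2)

-- "B's backward walk from s hits an asteroid before leaving the field or reaching pos"
def pvWalkW (field : List (List Bool)) (P d s : Int × Int) : Prop :=
  ∃ k : Nat, pvCellAt field (pvBack s d k).1 (pvBack s d k).2 = true ∧
    ∀ j : Nat, j ≤ k → pvIsInside (pvBack s d j) field = true ∧ pvBack s d j ≠ P

-- ---- number theory: pvNormalize ----

theorem pv_norm_eq (d : Int × Int) (hd : d ≠ (0, 0)) :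
    pvNormalize d = (d.1 / (Int.gcd d.1 d.2 : Int), d.2 / (Int.gcd d.1 d.2 : Int)) := by
  obtain ⟨a, b⟩ := d
  have hg : a ≠ 0 ∨ b ≠ 0 := by
    by_contra h; push_neg at h; exact hd (by simp [h.1, h.2])
  have hgpos : 0 < (Int.gcd a b : Int) := by
    exact_mod_cast Nat.pos_of_ne_zero (by
      intro h0
      rcases Int.gcd_eq_zero_iff.mp h0 with ⟨h1, h2⟩
      rcases hg with h | h <;> simp_all)
  unfold pvNormalize
  by_cases ha : a = 0
  · have hb : b ≠ 0 := by tauto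
    subst ha
    rw [if_neg (by simp), if_pos (by simp [hb])]
    have h1 : ((Int.gcd 0 b : Nat) : Int) = |b| := by
      rw [Int.gcd_zero_left]; exact (Int.abs_eq_natAbs b).symm
    rw [Prod.ext_iff]
    refine ⟨by simp, ?_⟩
    simp only [h1]
    rw [PySem.Int.floordiv_eq_ediv_of_pos (by positivity)]
  · by_cases hb : b = 0
    · subst hb
      rw [if_pos (by simp [ha])]
      have h1 : ((Int.gcd a 0 : Nat) : Int) = |a| := by
        rw [Int.gcd_zero_right]; exact (Int.abs_eq_natAbs a).symm
      rw [Prod.ext_iff]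
      refine ⟨?_, by simp⟩
      simp only [h1]
      rw [PySem.Int.floordiv_eq_ediv_of_pos (by positivity)]
    · rw [if_neg (by tauto), if_neg (by tauto)]
      simp only []
      rw [abs_of_pos hgpos]
      rw [PySem.Int.floordiv_eq_ediv_of_pos hgpos, PySem.Int.floordiv_eq_ediv_of_pos hgpos]

theorem pv_norm_decomp (d : Int × Int) (hd : d ≠ (0, 0)) :
    ∃ m : Nat, 1 ≤ m ∧ d.1 = (m : Int) * (pvNormalize d).1 ∧ d.2 = (m : Int) * (pvNormalize d).2 ∧
      Int.gcd (pvNormalize d).1 (pvNormalize d).2 = 1 := by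
  have hg : d.1 ≠ 0 ∨ d.2 ≠ 0 := by
    by_contra h; push_neg at h
    exact hd (Prod.ext_iff.mpr ⟨h.1, h.2⟩)
  have hgne : Int.gcd d.1 d.2 ≠ 0 := by
    intro h0; rcases Int.gcd_eq_zero_iff.mp h0 with ⟨h1, h2⟩
    rcases hg with h | h <;> simp_all
  refine ⟨Int.gcd d.1 d.2, Nat.one_le_iff_ne_zero.mpr hgne, ?_, ?_, ?_⟩
  · rw [pv_norm_eq d hd]
    exact (Int.mul_ediv_cancel' (Int.gcd_dvd_left d.1 d.2)).symm
  · rw [pv_norm_eq d hd]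
    exact (Int.mul_ediv_cancel' (Int.gcd_dvd_right d.1 d.2)).symm
  · rw [pv_norm_eq d hd]
    exact Int.gcd_div_gcd_div_gcd (by exact_mod_cast Nat.pos_of_ne_zero hgne)

theorem pv_norm_mul (e : Int × Int) (he : Int.gcd e.1 e.2 = 1) (m : Nat) (hm : 1 ≤ m) :
    pvNormalize ((m : Int) * e.1, (m : Int) * e.2) = e := by
  have hene : e ≠ (0, 0) := by
    intro h; rw [h] at he; simp at he
  have hm0 : (m : Int) ≠ 0 := by exact_mod_cast Nat.one_le_iff_ne_zero.mp hm
  have hne : ((m : Int) * e.1, (m : Int) * e.2) ≠ (0, 0) := by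
    intro h
    rw [Prod.ext_iff] at h
    simp only at h
    refine hene (Prod.ext_iff.mpr ⟨?_, ?_⟩)
    · rcases mul_eq_zero.mp h.1 with h' | h'; exact absurd h' hm0; exact h'
    · rcases mul_eq_zero.mp h.2 with h' | h'; exact absurd h' hm0; exact h'
  rw [pv_norm_eq _ hne]
  have hgcd : Int.gcd ((m : Int) * e.1) ((m : Int) * e.2) = m := by
    rw [Int.gcd_mul_left]
    simp [he]
  rw [Prod.ext_iff]
  simp only [hgcd]
  exact ⟨by rw [Int.mul_ediv_cancel_left _ hm0], by rw [Int.mul_ediv_cancel_left _ hm0]⟩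

theorem pv_prim_unique (e e' : Int × Int) (m m' : Nat)
    (he : Int.gcd e.1 e.2 = 1) (he' : Int.gcd e'.1 e'.2 = 1) (hm : 1 ≤ m) (hm' : 1 ≤ m')
    (h1 : (m : Int) * e.1 = (m' : Int) * e'.1) (h2 : (m : Int) * e.2 = (m' : Int) * e'.2) :
    m = m' ∧ e = e' := by
  have hmm : m = m' := by
    have ha : Int.gcd ((m : Int) * e.1) ((m : Int) * e.2) = m := by
      rw [Int.gcd_mul_left]; simp [he]
    have hb : Int.gcd ((m' : Int) * e'.1) ((m' : Int) * e'.2) = m' := by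
      rw [Int.gcd_mul_left]; simp [he']
    rw [h1, h2, hb] at ha; omega
  subst hmm
  have hm0 : (m : Int) ≠ 0 := by exact_mod_cast Nat.one_le_iff_ne_zero.mp hm
  exact ⟨rfl, Prod.ext_iff.mpr ⟨mul_left_cancel₀ hm0 h1, mul_left_cancel₀ hm0 h2⟩⟩

theorem pv_prim_ne_zero (e : Int × Int) (he : Int.gcd e.1 e.2 = 1) : e ≠ (0, 0) := by
  intro h; rw [h] at he; simp at he

-- ---- grid basics ----

theorem pv_inside_congr (field g : List (List Bool)) (hsh : pvSh field g) (q : Int × Int) :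
    pvIsInside q g = pvIsInside q field := by
  unfold pvIsInside; rw [hsh.1, hsh.2 q.2.toNat]

theorem pv_inside_false_iff (q : Int × Int) (f : List (List Bool)) :
    pvIsInside q f = false ↔
      ¬(0 ≤ q.2 ∧ q.2 < (f.length : Int) ∧ 0 ≤ q.1 ∧ q.1 < (((f.getD q.2.toNat []).length : Int))) := by
  unfold pvIsInside
  simp only [Bool.and_eq_true, decide_eq_true_eq, Bool.eq_false_iff, ne_eq]
  tauto

theorem pv_cell_eq_inside_raw (f : List (List Bool)) (c r : Int) :
    pvCellAt f c r = (pvIsInside (c, r) f && (f.getD r.toNat []).getD c.toNat false) := rfl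

theorem pv_insideB_eq (c r : Int) (f : List (List Bool)) :
    pvInsideB c r f = pvIsInside (c, r) f := rfl

theorem pv_cell_imp_inside (f : List (List Bool)) (c r : Int) (h : pvCellAt f c r = true) :
    pvIsInside (c, r) f = true := by
  rw [pv_cell_eq_inside_raw] at h
  simp only [Bool.and_eq_true] at h
  exact h.1

theorem pv_getD_set (g : List (List Bool)) (n : Nat) (x : List Bool) (hn : n < g.length) (i : Nat) :
    (g.set n x).getD i [] = if i = n then x else g.getD i [] := by
  by_cases h : i = n
  · subst h; simp [List.getD_eq_getElem?_getD, List.getElem?_set_eq_of_lt _ hn]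
  · simp [List.getD_eq_getElem?_getD, List.getElem?_set_ne (by omega : n ≠ i), h]

theorem pv_sh_setFalse (field g : List (List Bool)) (hsh : pvSh field g) (p : Int × Int)
    (hp : pvIsInside p g = true) : pvSh field (pvSetFalse g p) := by
  unfold pvIsInside at hp
  simp only [Bool.and_eq_true, decide_eq_true_eq] at hp
  obtain ⟨⟨⟨_, hlt⟩, _⟩, _⟩ := hp
  have hlt' : p.2.toNat < g.length := by omega
  constructor
  · rw [pvSetFalse, List.length_set, hsh.1]
  · intro i
    rw [pvSetFalse, pv_getD_set g _ _ hlt' i]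
    by_cases h : i = p.2.toNat
    · subst h; rw [if_pos rfl, List.length_set]; exact hsh.2 _
    · rw [if_neg h]; exact hsh.2 i

theorem pv_cell_setFalse (g : List (List Bool)) (p : Int × Int) (hp : pvIsInside p g = true)
    (q : Int × Int) :
    (pvCellAt (pvSetFalse g p) q.1 q.2 = true) ↔ (pvCellAt g q.1 q.2 = true ∧ q ≠ p) := by
  unfold pvIsInside at hp
  simp only [Bool.and_eq_true, decide_eq_true_eq] at hp
  obtain ⟨⟨⟨h2, hlt2⟩, h1⟩, hlt1⟩ := hp
  have hlt2' : p.2.toNat < g.length := by omega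
  unfold pvCellAt pvSetFalse
  rw [List.length_set, pv_getD_set g _ _ hlt2' q.2.toNat]
  simp only [Bool.and_eq_true, decide_eq_true_eq]
  by_cases hr : q.2.toNat = p.2.toNat
  · rw [if_pos hr, List.length_set]
    by_cases hq2 : 0 ≤ q.2
    · have hq2eq : q.2 = p.2 := by omega
      by_cases hc : q.1.toNat = p.1.toNat
      · by_cases hq1 : 0 ≤ q.1
        · have hq1eq : q.1 = p.1 := by omega
          have hfalse : (((g.getD p.2.toNat []).set p.1.toNat false).getD q.1.toNat false) = false := by
            rw [hc, List.getD_eq_getElem?_getD,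
              List.getElem?_set_eq_of_lt false (show p.1.toNat < (g.getD p.2.toNat []).length by omega)]
            rfl
          rw [hfalse]
          simp only [Bool.false_eq_true]
          constructor
          · intro h; exact absurd h.2 (by simp)
          · intro h; exact absurd (Prod.ext_iff.mpr ⟨hq1eq, hq2eq⟩) h.2
        · simp only [hq1]; tauto
      · have hkeep : (((g.getD p.2.toNat []).set p.1.toNat false).getD q.1.toNat false) =
            ((g.getD p.2.toNat []).getD q.1.toNat false) := by
          simp [List.getD_eq_getElem?_getD, List.getElem?_set_ne (by omega : p.1.toNat ≠ q.1.toNat)]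
        rw [hkeep, hq2eq]
        have hne : q ≠ p := by
          intro h; rw [h] at hc; exact hc rfl
        tauto
    · simp only [hq2]; tauto
  · rw [if_neg hr]
    have hne : q ≠ p := by
      intro h; rw [h] at hr; exact hr rfl
    tauto

theorem pv_maxw_ge (field : List (List Bool)) (i : Nat) :
    (field.getD i []).length ≤ field.foldl (fun m r => max m r.length) 0 := by
  have key : ∀ (l : List (List Bool)) (a : Nat),
      (∀ x ∈ l, x.length ≤ l.foldl (fun m r => max m r.length) a) ∧
        a ≤ l.foldl (fun m r => max m r.length) a := by
    intro l
    induction l with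
    | nil => intro a; exact ⟨by simp, le_refl a⟩
    | cons x xs ih =>
      intro a
      constructor
      · intro y hy
        rcases List.mem_cons.mp hy with h | h
        · subst h
          calc y.length ≤ max a y.length := le_max_right _ _
            _ ≤ _ := (ih (max a y.length)).2
        · simpa using (ih (max a x.length)).1 y h
      · calc a ≤ max a x.length := le_max_left _ _
          _ ≤ _ := (ih (max a x.length)).2
  by_cases h : i < field.length
  · have hg : field.getD i [] = field[i] := List.getD_eq_getElem field [] h
    rw [hg]
    exact (key field 0).1 _ (List.getElem_mem h)
  · rw [List.getD_eq_default field [] (by omega)]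
    simp

theorem pv_cell_props (f : List (List Bool)) (c r : Int) (h : pvCellAt f c r = true) :
    0 ≤ r ∧ r < (f.length : Int) ∧ 0 ≤ c ∧ c < ((f.getD r.toNat []).length : Int) := by
  unfold pvCellAt at h
  simp only [Bool.and_eq_true, decide_eq_true_eq] at h
  tauto

theorem pv_cell_nat (g : List (List Bool)) (r c : Nat) (hr : r < g.length)
    (hc : c < (g.getD r []).length) :
    pvCellAt g (c : Int) (r : Int) = (g.getD r []).getD c false := by
  unfold pvCellAt
  simp only [Int.toNat_natCast]
  rw [decide_eq_true (by positivity : (0:Int) ≤ (r : Int)),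
      decide_eq_true (by exact_mod_cast hr),
      decide_eq_true (by positivity : (0:Int) ≤ (c : Int)),
      decide_eq_true (by exact_mod_cast hc)]
  simp

theorem pv_cell_wide (f : List (List Bool)) (r c : Nat) (hc : (f.getD r []).length ≤ c) :
    pvCellAt f (c : Int) (r : Int) = false := by
  rw [pv_cell_eq_inside_raw]
  have hin : pvIsInside ((c : Int), (r : Int)) f = false := by
    rw [pv_inside_false_iff]
    intro hcon
    simp only [Int.toNat_natCast] at hcon
    have := hcon.2.2.2
    omega
  rw [hin]; simp

-- ---- rays and chains ----

theorem pv_ray_zero (p d : Int × Int) : pvRay p d 0 = p := by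
  unfold pvRay; simp

theorem pv_ray_one (p d : Int × Int) : pvRay p d 1 = (p.1 + d.1, p.2 + d.2) := by
  unfold pvRay; simp

theorem pv_ray_shift (p d : Int × Int) (k : Nat) :
    pvRay (p.1 + d.1, p.2 + d.2) d k = pvRay p d (k + 1) := by
  unfold pvRay
  rw [Prod.ext_iff]
  constructor <;> (simp only []; push_cast; ring)

theorem pv_ray_add (p d : Int × Int) (k1 k2 : Nat) :
    pvRay (pvRay p d k1) d k2 = pvRay p d (k1 + k2) := by
  unfold pvRay
  rw [Prod.ext_iff]
  constructor <;> (simp only []; push_cast; ring)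

theorem pv_back_zero (s d : Int × Int) : pvBack s d 0 = s := by
  unfold pvBack; simp

theorem pv_back_one (s d : Int × Int) : pvBack s d 1 = (s.1 - d.1, s.2 - d.2) := by
  unfold pvBack; simp

theorem pv_back_shift (s d : Int × Int) (j : Nat) :
    pvBack (s.1 - d.1, s.2 - d.2) d j = pvBack s d (j + 1) := by
  unfold pvBack
  rw [Prod.ext_iff]
  constructor <;> (simp only []; push_cast; ring)

theorem pv_back_ray (q b d : Int × Int) (K m : Nat) (hq : q = pvRay b d K) (hm : m ≤ K) :
    pvBack q d m = pvRay b d (K - m) := by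
  subst hq
  unfold pvBack pvRay
  rw [Prod.ext_iff]
  have hc : ((K - m : Nat) : Int) = (K : Int) - (m : Int) := by
    rw [Int.ofNat_sub hm]
  constructor <;> (simp only [hc]; push_cast; ring)

theorem pv_chain_cons (field : List (List Bool)) (p d q : Int × Int)
    (h1 : pvIsInside (p.1 + d.1, p.2 + d.2) field = true) :
    pvChain field p d q ↔ (q = (p.1 + d.1, p.2 + d.2) ∨ pvChain field (p.1 + d.1, p.2 + d.2) d q) := by
  constructor
  · rintro ⟨k, hk, hq, hins⟩
    rcases Nat.eq_or_lt_of_le hk with h | h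
    · left; rw [hq, ← h, pv_ray_one]
    · right
      refine ⟨k - 1, by omega, ?_, ?_⟩
      · rw [hq, pv_ray_shift]; congr 1; omega
      · intro i hi1 hik
        rw [pv_ray_shift]
        exact hins (i + 1) (by omega) (by omega)
  · rintro (h | ⟨k, hk, hq, hins⟩)
    · refine ⟨1, le_rfl, by rw [pv_ray_one, h], ?_⟩
      intro i hi1 hik
      have hone : i = 1 := by omega
      subst hone; rw [pv_ray_one]; exact h1
    · refine ⟨k + 1, by omega, by rw [hq, pv_ray_shift], ?_⟩
      intro i hi1 hik
      rcases Nat.eq_or_lt_of_le hi1 with h' | h'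
      · rw [← h', pv_ray_one]; exact h1
      · have hh := hins (i - 1) (by omega) (by omega)
        rw [pv_ray_shift] at hh
        have hir : i - 1 + 1 = i := by omega
        rw [hir] at hh; exact hh

theorem pv_chain_trans (f : List (List Bool)) (b' b q d : Int × Int)
    (h1 : pvChain f b' d b) (h2 : pvChain f b d q) : pvChain f b' d q := by
  obtain ⟨k1, hk1, hb, hi1⟩ := h1
  obtain ⟨k2, hk2, hq, hi2⟩ := h2
  refine ⟨k1 + k2, by omega, by rw [hq, hb, pv_ray_add], ?_⟩
  intro i hi hile
  by_cases h : i ≤ k1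
  · exact hi1 i hi h
  · have hh := hi2 (i - k1) (by omega) (by omega)
    rw [hb, pv_ray_add] at hh
    have hii : k1 + (i - k1) = i := by omega
    rw [hii] at hh
    exact hh

-- ---- darkening ----

theorem pv_darken_char (field : List (List Bool)) (d : Int × Int) :
    ∀ (fuel n : Nat) (p : Int × Int) (g : List (List Bool)), pvSh field g →
    1 ≤ n → n ≤ fuel → pvIsInside (pvRay p d n) field = false →
    pvSh field (pvDarkenFrom p g d fuel) ∧
    ∀ q : Int × Int, pvCellAt (pvDarkenFrom p g d fuel) q.1 q.2 = true ↔
      (pvCellAt g q.1 q.2 = true ∧ ¬ pvChain field p d q) := by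
  intro fuel
  induction fuel with
  | zero => intro n p g hsh h1 h2 h3; omega
  | succ m ih =>
    intro n p g hsh h1 h2 h3
    simp only [pvDarkenFrom]
    by_cases hin : pvIsInside (p.1 + d.1, p.2 + d.2) g = true
    · rw [if_pos hin]
      have hinf : pvIsInside (p.1 + d.1, p.2 + d.2) field = true := by
        rw [← pv_inside_congr field g hsh]; exact hin
      have hn1 : n ≠ 1 := by
        intro h; rw [h, pv_ray_one] at h3; rw [h3] at hinf; cases hinf
      have hsh' := pv_sh_setFalse field g hsh _ hin
      have h3' : pvIsInside (pvRay (p.1 + d.1, p.2 + d.2) d (n - 1)) field = false := by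
        rw [pv_ray_shift]
        have hnn : n - 1 + 1 = n := by omega
        rw [hnn]; exact h3
      obtain ⟨ihsh, ihcell⟩ := ih (n - 1) (p.1 + d.1, p.2 + d.2) _ hsh' (by omega) (by omega) h3'
      refine ⟨ihsh, ?_⟩
      intro q
      rw [ihcell q, pv_cell_setFalse g _ hin q, pv_chain_cons field p d q hinf]
      constructor
      · rintro ⟨⟨hc, hne⟩, hnc⟩
        exact ⟨hc, by rintro (h | h); exact hne h; exact hnc h⟩
      · rintro ⟨hc, hor⟩
        exact ⟨⟨hc, fun h => hor (Or.inl h)⟩, fun h => hor (Or.inr h)⟩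
    · rw [if_neg hin]
      refine ⟨hsh, fun q => ?_⟩
      have hinf : pvIsInside (p.1 + d.1, p.2 + d.2) field = false := by
        rw [← pv_inside_congr field g hsh]
        exact Bool.eq_false_iff.mpr (fun h => hin h)
      have hnchain : ¬ pvChain field p d q := by
        rintro ⟨k, hk, hq, hins⟩
        have hh := hins 1 le_rfl hk
        rw [pv_ray_one] at hh
        rw [hh] at hinf; cases hinf
      tauto

theorem pv_int_pigeon (a step B : Int) (hstep : step ≠ 0) (hB : 0 ≤ B) :
    ∃ n : Nat, 1 ≤ n ∧ n ≤ B.toNat + 1 ∧ ¬(0 ≤ a + (n : Int) * step ∧ a + (n : Int) * step < B) := by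
  have hBt : ((B.toNat : Int)) = B := Int.toNat_of_nonneg hB
  rcases lt_or_gt_of_ne hstep with hneg | hpos
  · by_cases h1 : B ≤ a + step
    · refine ⟨1, le_rfl, by omega, ?_⟩
      intro hcon
      push_cast at hcon
      omega
    · push_neg at h1
      refine ⟨B.toNat + 1, by omega, le_rfl, ?_⟩
      intro hcon
      obtain ⟨hge, _⟩ := hcon
      have hv : a + (((B.toNat + 1 : Nat)) : Int) * step = (a + step) + B * step := by
        push_cast [hBt]; ring
      have hBs : B * step ≤ -B := by nlinarith
      rw [hv] at hge
      omega
  · by_cases h1 : a + step < 0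
    · refine ⟨1, le_rfl, by omega, ?_⟩
      intro hcon
      push_cast at hcon
      omega
    · push_neg at h1
      refine ⟨B.toNat + 1, by omega, le_rfl, ?_⟩
      intro hcon
      obtain ⟨_, hlt⟩ := hcon
      have hv : a + (((B.toNat + 1 : Nat)) : Int) * step = (a + step) + B * step := by
        push_cast [hBt]; ring
      have hBs : B ≤ B * step := by nlinarith
      rw [hv] at hlt
      omega

theorem pv_escape (field : List (List Bool)) (d : Int × Int) (hd : d ≠ (0, 0)) (p : Int × Int) :
    ∃ n : Nat, 1 ≤ n ∧ n ≤ pvFuel field ∧ pvIsInside (pvRay p d n) field = false := by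
  by_cases hd2 : d.2 = 0
  · have hd1 : d.1 ≠ 0 := by
      intro h; exact hd (Prod.ext_iff.mpr ⟨h, hd2⟩)
    have hray2 : ∀ n : Nat, (pvRay p d n).2 = p.2 := by
      intro n; unfold pvRay; simp [hd2]
    by_cases hrow : 0 ≤ p.2 ∧ p.2 < (field.length : Int)
    · obtain ⟨n, hn1, hn2, hn3⟩ :=
        pv_int_pigeon p.1 d.1 (((field.getD p.2.toNat []).length : Nat) : Int) hd1 (by positivity)
      refine ⟨n, hn1, ?_, ?_⟩
      · have hmw := pv_maxw_ge field p.2.toNat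
        unfold pvFuel
        simp only [Int.toNat_natCast] at hn2
        omega
      · rw [pv_inside_false_iff]
        intro hcon
        rw [hray2 n] at hcon
        exact hn3 ⟨hcon.2.2.1, hcon.2.2.2⟩
    · refine ⟨1, le_rfl, by unfold pvFuel; omega, ?_⟩
      rw [pv_inside_false_iff]
      intro hcon
      rw [hray2 1] at hcon
      exact hrow ⟨hcon.1, hcon.2.1⟩
  · obtain ⟨n, hn1, hn2, hn3⟩ := pv_int_pigeon p.2 d.2 ((field.length : Nat) : Int) hd2 (by positivity)
    refine ⟨n, hn1, ?_, ?_⟩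
    · unfold pvFuel
      simp only [Int.toNat_natCast] at hn2
      omega
    · rw [pv_inside_false_iff]
      intro hcon
      exact hn3 ⟨hcon.1, hcon.2.1⟩

-- ---- Pre_ consequences ----

theorem pv_pos2 (pos : List Int) (h : pos.length = 2) : pos = [pvP0 pos, pvP1 pos] := by
  match pos, h with
  | [a, b], _ => rfl

theorem pv_posP (pos : List Int) (x y : Int) (h : pos = [x, y]) : pvP0 pos = x ∧ pvP1 pos = y := by
  subst h; exact ⟨rfl, rfl⟩

theorem pv_ne_P (pos : List Int) (field : List (List Bool))
    (hpre : Pre_calc_visible_asteroids_from pos field) (b : Int × Int)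
    (hb : pvCellAt field b.1 b.2 = true) (hbs : pos ≠ [b.1, b.2]) :
    b ≠ (pvP0 pos, pvP1 pos) := by
  intro hEq
  rcases hpre.2 with h2 | h2
  · exact hbs (by rw [pv_pos2 pos h2]; rw [hEq])
  · rw [hEq] at hb
    simp only at hb
    unfold pvP0 pvP1 at hb
    rw [hb] at h2; cases h2

theorem pv_ne_P_sub (pos : List Int) (field : List (List Bool))
    (hpre : Pre_calc_visible_asteroids_from pos field) (b : Int × Int)
    (hb : pvCellAt field b.1 b.2 = true) (hbs : pos ≠ [b.1, b.2]) :
    (b.1 - pvP0 pos, b.2 - pvP1 pos) ≠ ((0 : Int), (0 : Int)) := by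
  intro hEq
  rw [Prod.ext_iff] at hEq
  simp only at hEq
  exact pv_ne_P pos field hpre b hb hbs (Prod.ext_iff.mpr ⟨by omega, by omega⟩)

-- ---- directions along a ray ----

theorem pv_dof_ray (pos : List Int) (b' : Int × Int)
    (hne : (b'.1 - pvP0 pos, b'.2 - pvP1 pos) ≠ ((0 : Int), (0 : Int))) (k : Nat) (hk : 1 ≤ k) :
    pvDOf pos (pvRay b' (pvDOf pos b') k) = pvDOf pos b' := by
  obtain ⟨m, hm, h1, h2, hprim⟩ := pv_norm_decomp _ hne
  simp only at h1 h2
  unfold pvDOf at *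
  set e := pvNormalize (b'.1 - pvP0 pos, b'.2 - pvP1 pos) with he
  have hc1 : ((pvRay b' e k).1 - pvP0 pos, (pvRay b' e k).2 - pvP1 pos) =
      (((m + k : Nat) : Int) * e.1, ((m + k : Nat) : Int) * e.2) := by
    unfold pvRay
    rw [Prod.ext_iff]
    refine ⟨?_, ?_⟩
    · simp only []
      push_cast
      rw [add_mul]
      linarith [h1]
    · simp only []
      push_cast
      rw [add_mul]
      linarith [h2]
  rw [hc1]
  exact pv_norm_mul e hprim (m + k) (by omega)

theorem pv_blocked_of_chain (pos : List Int) (field : List (List Bool))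
    (hpre : Pre_calc_visible_asteroids_from pos field) (S : Int × Int → Prop) (b0 q : Int × Int)
    (hb0 : pvCellAt field b0.1 b0.2 = true)
    (hbl : pvBlocked pos field S b0) (hch : pvChain field b0 (pvDOf pos b0) q) :
    pvBlocked pos field S q := by
  obtain ⟨b', hS, hcell, hbs, hch'⟩ := hbl
  have hne := pv_ne_P_sub pos field hpre b' hcell hbs
  obtain ⟨k, hk, hb0eq, hrest⟩ := hch'
  have hdof : pvDOf pos b0 = pvDOf pos b' := by
    rw [hb0eq]; exact pv_dof_ray pos b' hne k hk
  rw [hdof] at hch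
  exact ⟨b', hS, hcell, hbs, pv_chain_trans field b' b0 q _ ⟨k, hk, hb0eq, hrest⟩ hch⟩

-- ---- loop invariant ----

theorem pv_blocked_mono (pos : List Int) (field : List (List Bool)) (S S' : Int × Int → Prop)
    (h : ∀ b, S b → S' b) (q : Int × Int) (hb : pvBlocked pos field S q) :
    pvBlocked pos field S' q := by
  obtain ⟨b, h1, h2, h3, h4⟩ := hb
  exact ⟨b, h b h1, h2, h3, h4⟩

theorem pv_blocked_union (pos : List Int) (field : List (List Bool)) (S : Int × Int → Prop)
    (b0 q : Int × Int) :
    pvBlocked pos field (fun x => S x ∨ x = b0) q ↔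
      (pvBlocked pos field S q ∨
        (pvCellAt field b0.1 b0.2 = true ∧ pos ≠ [b0.1, b0.2] ∧
          pvChain field b0 (pvDOf pos b0) q)) := by
  constructor
  · rintro ⟨b, (hS | hEq), h2, h3, h4⟩
    · exact Or.inl ⟨b, hS, h2, h3, h4⟩
    · subst hEq; exact Or.inr ⟨h2, h3, h4⟩
  · rintro (⟨b, hS, h2, h3, h4⟩ | ⟨h2, h3, h4⟩)
    · exact ⟨b, Or.inl hS, h2, h3, h4⟩
    · exact ⟨b0, Or.inr rfl, h2, h3, h4⟩

theorem pv_inv_ext (pos : List Int) (field : List (List Bool)) (S S' : Int × Int → Prop)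
    (g : List (List Bool))
    (h1 : ∀ q, S' q → S q ∨ pvCellAt field q.1 q.2 = false)
    (h2 : ∀ q, S q → S' q) (hinv : pvInv pos field S g) : pvInv pos field S' g := by
  refine ⟨hinv.1, fun q => ?_⟩
  rw [hinv.2 q]
  by_cases hc : pvCellAt field q.1 q.2 = true
  · simp only [hc, true_and]
    constructor
    · rintro ⟨ha, hb⟩
      refine ⟨?_, ?_⟩
      · rintro ⟨hx, hy⟩
        rcases h1 q hy with h | h
        · exact ha ⟨hx, h⟩
        · rw [hc] at h; cases h
      · intro hbl
        obtain ⟨b, hS', hcell, hbs, hch⟩ := hbl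
        rcases h1 b hS' with h | h
        · exact hb ⟨b, h, hcell, hbs, hch⟩
        · rw [hcell] at h; cases h
    · rintro ⟨ha, hb⟩
      exact ⟨fun hxy => ha ⟨hxy.1, h2 q hxy.2⟩,
        fun hbl => hb (pv_blocked_mono pos field S S' h2 q hbl)⟩
  · simp only [Bool.eq_false_iff.mpr hc]
    tauto

theorem pv_proc_zero (q : Int × Int) : ¬ pvProc 0 0 q := by
  rintro ⟨ri, ci, _, h⟩; omega

theorem pv_proc_col (r c : Nat) (q : Int × Int) :
    pvProc r (c + 1) q ↔ (pvProc r c q ∨ q = ((c : Int), (r : Int))) := by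
  constructor
  · rintro ⟨ri, ci, hq, h⟩
    by_cases hh : ri = r ∧ ci = c
    · right; rw [hq, hh.1, hh.2]
    · left; exact ⟨ri, ci, hq, by omega⟩
  · rintro (⟨ri, ci, hq, h⟩ | h)
    · exact ⟨ri, ci, hq, by omega⟩
    · exact ⟨r, c, h, by omega⟩

theorem pv_proc_mono (r c r' c' : Nat) (h : r < r' ∨ (r = r' ∧ c ≤ c')) (q : Int × Int)
    (hq : pvProc r c q) : pvProc r' c' q := by
  obtain ⟨ri, ci, h1, h2⟩ := hq
  exact ⟨ri, ci, h1, by omega⟩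

theorem pv_proc_row (field : List (List Bool)) (r : Nat) (q : Int × Int)
    (h : pvProc (r + 1) 0 q) :
    pvProc r ((field.getD r []).length) q ∨ pvCellAt field q.1 q.2 = false := by
  obtain ⟨ri, ci, h1, h2⟩ := h
  by_cases hr : ri < r
  · left; exact ⟨ri, ci, h1, by omega⟩
  · have hrr : ri = r := by omega
    by_cases hc : ci < (field.getD r []).length
    · left; exact ⟨ri, ci, h1, by omega⟩
    · right
      rw [h1, hrr]
      exact pv_cell_wide field r ci (by omega)

theorem pv_inv_init (pos : List Int) (field : List (List Bool)) :
    pvInv pos field (pvProc 0 0) field := by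
  refine ⟨⟨rfl, fun _ => rfl⟩, fun q => ?_⟩
  constructor
  · intro h
    refine ⟨h, ?_, ?_⟩
    · rintro ⟨_, hy⟩; exact pv_proc_zero q hy
    · rintro ⟨b, hS, _⟩; exact pv_proc_zero b hS
  · intro h; exact h.1

-- the effect of processing one cell
theorem pv_step (pos : List Int) (field : List (List Bool))
    (hpre : Pre_calc_visible_asteroids_from pos field) (S : Int × Int → Prop)
    (g : List (List Bool)) (r c : Nat) (hr : r < field.length)
    (hc : c < (field.getD r []).length) (hinv : pvInv pos field S g) :
    pvInv pos field (fun q => S q ∨ q = ((c : Int), (r : Int)))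
      (if (g.getD r []).getD c false then
        if pos = [(c : Int), (r : Int)] then pvSetFalse g ((c : Int), (r : Int))
        else
          pvDarkenFrom ((c : Int), (r : Int)) g
            (pvNormalize ((c : Int) - (PySem.List.pyGet? pos 0).getD 0,
                          (r : Int) - (PySem.List.pyGet? pos 1).getD 0)) (pvFuel field)
      else g) := by
  obtain ⟨hsh, hcellinv⟩ := hinv
  have hrG : r < g.length := by rw [hsh.1]; exact hr
  have hcG : c < (g.getD r []).length := by rw [hsh.2 r]; exact hc
  have hcellg : pvCellAt g (c : Int) (r : Int) = (g.getD r []).getD c false :=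
    pv_cell_nat g r c hrG hcG
  have hcellf : pvCellAt field (c : Int) (r : Int) = (field.getD r []).getD c false :=
    pv_cell_nat field r c hr hc
  by_cases htest : (g.getD r []).getD c false = true
  · rw [if_pos htest]
    have hgtrue : pvCellAt g ((c : Int), (r : Int)).1 ((c : Int), (r : Int)).2 = true := by
      simp only []; rw [hcellg]; exact htest
    obtain ⟨hf0, hst0, hbl0⟩ := (hcellinv ((c : Int), (r : Int))).mp hgtrue
    have hq0in : pvIsInside ((c : Int), (r : Int)) g = true :=
      pv_cell_imp_inside g (c : Int) (r : Int) hgtrue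
    by_cases hposq : pos = [(c : Int), (r : Int)]
    · rw [if_pos hposq]
      refine ⟨pv_sh_setFalse field g hsh _ hq0in, fun q => ?_⟩
      rw [pv_cell_setFalse g _ hq0in q, hcellinv q, pv_blocked_union]
      by_cases hqq : q = ((c : Int), (r : Int))
      · subst hqq
        constructor
        · rintro ⟨_, hne⟩; exact absurd rfl hne
        · rintro ⟨_, hst, _⟩
          exact absurd ⟨hposq, Or.inr rfl⟩ hst
      · constructor
        · rintro ⟨⟨hcf, hst, hbl⟩, _⟩
          refine ⟨hcf, ?_, ?_⟩
          · rintro ⟨hx, (hy | hy)⟩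
            · exact hst ⟨hx, hy⟩
            · exact hqq hy
          · rintro (hbl' | ⟨_, hnp, _⟩)
            · exact hbl hbl'
            · exact hnp hposq
        · rintro ⟨hcf, hst, hbl⟩
          refine ⟨⟨hcf, fun hxy => hst ⟨hxy.1, Or.inl hxy.2⟩, fun h => hbl (Or.inl h)⟩, hqq⟩
    · rw [if_neg hposq]
      have hdne : pvNormalize ((c : Int) - (PySem.List.pyGet? pos 0).getD 0,
          (r : Int) - (PySem.List.pyGet? pos 1).getD 0) ≠ (0, 0) := by
        have hsub := pv_ne_P_sub pos field hpre ((c : Int), (r : Int)) hf0 hposq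
        obtain ⟨m, hm, ha, hb, hprim⟩ := pv_norm_decomp _ hsub
        exact pv_prim_ne_zero _ hprim
      obtain ⟨n, hn1, hn2, hn3⟩ := pv_escape field _ hdne ((c : Int), (r : Int))
      obtain ⟨hsh', hcell'⟩ :=
        pv_darken_char field _ (pvFuel field) n ((c : Int), (r : Int)) g hsh hn1 hn2 hn3
      refine ⟨hsh', fun q => ?_⟩
      rw [hcell' q, hcellinv q, pv_blocked_union]
      have hdof : pvDOf pos ((c : Int), (r : Int)) =
          pvNormalize ((c : Int) - (PySem.List.pyGet? pos 0).getD 0,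
            (r : Int) - (PySem.List.pyGet? pos 1).getD 0) := rfl
      constructor
      · rintro ⟨⟨hcf, hst, hbl⟩, hnc⟩
        refine ⟨hcf, ?_, ?_⟩
        · rintro ⟨hx, (hy | hy)⟩
          · exact hst ⟨hx, hy⟩
          · rw [hy] at hx; exact hposq hx
        · rintro (hbl' | ⟨_, _, hch⟩)
          · exact hbl hbl'
          · rw [hdof] at hch; exact hnc hch
      · rintro ⟨hcf, hst, hbl⟩
        refine ⟨⟨hcf, fun hxy => hst ⟨hxy.1, Or.inl hxy.2⟩, fun h => hbl (Or.inl h)⟩, ?_⟩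
        intro hch
        exact hbl (Or.inr ⟨hf0, hposq, by rw [hdof]; exact hch⟩)
  · rw [if_neg htest]
    refine ⟨hsh, fun q => ?_⟩
    rw [hcellinv q]
    have hgfalse : ¬ (pvCellAt g (c : Int) (r : Int) = true) := by
      rw [hcellg]; exact htest
    by_cases hcf0 : pvCellAt field (c : Int) (r : Int) = true
    · by_cases hposq : pos = [(c : Int), (r : Int)]
      · constructor
        · rintro ⟨hcf, hst, hbl⟩
          refine ⟨hcf, ?_, ?_⟩
          · rintro ⟨hx, (hy | hy)⟩
            · exact hst ⟨hx, hy⟩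
            · exfalso
              apply hgfalse
              apply (hcellinv ((c : Int), (r : Int))).mpr
              rw [← hy]
              exact ⟨hcf, hst, hbl⟩
          · rintro hbl'
            rcases (pv_blocked_union pos field S _ q).mp hbl' with h | ⟨_, hnp, _⟩
            · exact hbl h
            · exact hnp hposq
        · rintro ⟨hcf, hst, hbl⟩
          exact ⟨hcf, fun hxy => hst ⟨hxy.1, Or.inl hxy.2⟩,
            fun h => hbl (pv_blocked_mono pos field S _ (fun b hb => Or.inl hb) q h)⟩
      · have hst0' : ¬(pos = [(c : Int), (r : Int)] ∧ S ((c : Int), (r : Int))) :=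
          fun hxy => hposq hxy.1
        have hbl0 : pvBlocked pos field S ((c : Int), (r : Int)) := by
          by_contra hbl
          exact hgfalse ((hcellinv ((c : Int), (r : Int))).mpr ⟨hcf0, hst0', hbl⟩)
        constructor
        · rintro ⟨hcf, hst, hbl⟩
          refine ⟨hcf, ?_, ?_⟩
          · rintro ⟨hx, (hy | hy)⟩
            · exact hst ⟨hx, hy⟩
            · rw [hy] at hx; exact hposq hx
          · rintro hbl'
            rcases (pv_blocked_union pos field S _ q).mp hbl' with h | ⟨hcell0, hnp0, hch0⟩
            · exact hbl h
            · exact hbl (pv_blocked_of_chain pos field hpre S _ q hcell0 hbl0 hch0)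
        · rintro ⟨hcf, hst, hbl⟩
          exact ⟨hcf, fun hxy => hst ⟨hxy.1, Or.inl hxy.2⟩,
            fun h => hbl (pv_blocked_mono pos field S _ (fun b hb => Or.inl hb) q h)⟩
    · constructor
      · rintro ⟨hcf, hst, hbl⟩
        refine ⟨hcf, ?_, ?_⟩
        · rintro ⟨hx, (hy | hy)⟩
          · exact hst ⟨hx, hy⟩
          · rw [hy] at hcf; exact hcf0 hcf
        · rintro hbl'
          rcases (pv_blocked_union pos field S _ q).mp hbl' with h | ⟨hcc, _, _⟩
          · exact hbl h
          · exact hcf0 hcc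
      · rintro ⟨hcf, hst, hbl⟩
        exact ⟨hcf, fun hxy => hst ⟨hxy.1, Or.inl hxy.2⟩,
          fun h => hbl (pv_blocked_mono pos field S _ (fun b hb => Or.inl hb) q h)⟩

-- processing one full row
theorem pv_inner (pos : List Int) (field : List (List Bool))
    (hpre : Pre_calc_visible_asteroids_from pos field) (r : Nat) (hr : r < field.length) :
    ∀ (w : Nat) (g : List (List Bool)), w ≤ (field.getD r []).length →
      pvInv pos field (pvProc r 0) g →
      pvInv pos field (pvProc r w)
        ((List.range w).foldl (fun va col =>
          if (va.getD r []).getD col false then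
            if pos = [(col : Int), (r : Int)] then pvSetFalse va ((col : Int), (r : Int))
            else
              pvDarkenFrom ((col : Int), (r : Int)) va
                (pvNormalize ((col : Int) - (PySem.List.pyGet? pos 0).getD 0,
                              (r : Int) - (PySem.List.pyGet? pos 1).getD 0)) (pvFuel field)
          else va) g) := by
  intro w
  induction w with
  | zero => intro g hw hinv; simpa using hinv
  | succ m ih =>
    intro g hw hinv
    rw [List.range_succ, List.foldl_append]
    simp only [List.foldl_cons, List.foldl_nil]
    have hinv' := ih g (by omega) hinv
    have hstep := pv_step pos field hpre (pvProc r m) _ r m hr (by omega) hinv'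
    exact pv_inv_ext pos field (fun q => pvProc r m q ∨ q = ((m : Int), (r : Int)))
      (pvProc r (m + 1)) _
      (fun q hq => Or.inl ((pv_proc_col r m q).mp hq))
      (fun q hq => (pv_proc_col r m q).mpr hq) hstep

theorem pv_outer (pos : List Int) (field : List (List Bool))
    (hpre : Pre_calc_visible_asteroids_from pos field) :
    ∀ (R : Nat), R ≤ field.length →
      pvInv pos field (pvProc R 0)
        ((List.range R).foldl (fun va row =>
          (List.range ((va.getD row []).length)).foldl (fun va2 col =>
            if (va2.getD row []).getD col false then
              if pos = [(col : Int), (row : Int)] then pvSetFalse va2 ((col : Int), (row : Int))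
              else
                pvDarkenFrom ((col : Int), (row : Int)) va2
                  (pvNormalize ((col : Int) - (PySem.List.pyGet? pos 0).getD 0,
                                (row : Int) - (PySem.List.pyGet? pos 1).getD 0)) (pvFuel field)
            else va2) va) field) := by
  intro R
  induction R with
  | zero => intro hR; simpa using pv_inv_init pos field
  | succ m ih =>
    intro hR
    rw [List.range_succ, List.foldl_append]
    simp only [List.foldl_cons, List.foldl_nil]
    have hinv := ih (by omega)
    have hlen := hinv.1.2 m
    rw [hlen]
    have hin := pv_inner pos field hpre m (by omega) ((field.getD m []).length) _ le_rfl hinv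
    exact pv_inv_ext pos field _ _ _
      (fun q hq => pv_proc_row field m q hq)
      (fun q hq => pv_proc_mono m ((field.getD m []).length) (m + 1) 0 (by omega) q hq) hin

-- ---- the backward walk ----

theorem pv_walkW_shift (field : List (List Bool)) (P d s : Int × Int)
    (hin : pvIsInside s field = true) (hne : s ≠ P) (hcell : pvCellAt field s.1 s.2 = false) :
    pvWalkW field P d (s.1 - d.1, s.2 - d.2) ↔ pvWalkW field P d s := by
  constructor
  · rintro ⟨k, hc, hj⟩
    refine ⟨k + 1, ?_, ?_⟩
    · rw [← pv_back_shift]; exact hc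
    · intro j hjk
      cases j with
      | zero => rw [pv_back_zero]; exact ⟨hin, hne⟩
      | succ i =>
        rw [← pv_back_shift]
        exact hj i (by omega)
  · rintro ⟨k, hc, hj⟩
    cases k with
    | zero =>
      rw [pv_back_zero] at hc
      rw [hc] at hcell; cases hcell
    | succ i =>
      refine ⟨i, ?_, ?_⟩
      · rw [pv_back_shift]; exact hc
      · intro j hjk
        rw [pv_back_shift]
        exact hj (j + 1) (by omega)

theorem pv_walk_char (field : List (List Bool)) (P d : Int × Int) :
    ∀ (fuel n : Nat) (s : Int × Int), n < fuel →
    ¬(pvIsInside (pvBack s d n) field = true ∧ pvBack s d n ≠ P) →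
    (pvWalk s.1 s.2 d.1 d.2 P.1 P.2 field fuel = false ↔ pvWalkW field P d s) := by
  intro fuel
  induction fuel with
  | zero => intro n s h; omega
  | succ m ih =>
    intro n s hn hstop
    simp only [pvWalk]
    by_cases hg : pvIsInside s field = true ∧ s ≠ P
    · have hgb : (pvInsideB s.1 s.2 field && !((s.1, s.2) == (P.1, P.2))) = true := by
        rw [pv_insideB_eq]
        have hs : ((s.1, s.2) : Int × Int) = s := rfl
        rw [hs, hg.1]
        simp only [Bool.true_and, Bool.not_eq_true']
        rw [beq_eq_false_iff_ne]
        intro h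
        exact hg.2 (by rw [← hs, h])
      rw [if_pos hgb]
      have hn0 : n ≠ 0 := by
        intro h; subst h; exact hstop (by rw [pv_back_zero]; exact hg)
      by_cases hc : (field.getD s.2.toNat []).getD s.1.toNat false = true
      · rw [if_pos hc]
        constructor
        · intro _
          refine ⟨0, ?_, ?_⟩
          · rw [pv_back_zero, pv_cell_eq_inside_raw]
            have hs : ((s.1, s.2) : Int × Int) = s := rfl
            rw [hs, hg.1, hc]; rfl
          · intro j hj
            have hj0 : j = 0 := by omega
            subst hj0; rw [pv_back_zero]; exact hg
        · intro _; rfl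
      · rw [if_neg hc]
        have hcell : pvCellAt field s.1 s.2 = false := by
          rw [pv_cell_eq_inside_raw]
          have hcf : (field.getD s.2.toNat []).getD s.1.toNat false = false :=
            Bool.eq_false_iff.mpr hc
          rw [hcf]; simp
        have hstop' : ¬(pvIsInside (pvBack (s.1 - d.1, s.2 - d.2) d (n - 1)) field = true ∧
            pvBack (s.1 - d.1, s.2 - d.2) d (n - 1) ≠ P) := by
          rw [pv_back_shift]
          have hnn : n - 1 + 1 = n := by omega
          rw [hnn]; exact hstop
        have hih := ih (n - 1) (s.1 - d.1, s.2 - d.2) (by omega) hstop'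
        rw [hih]
        exact pv_walkW_shift field P d s hg.1 hg.2 hcell
    · have hgb : (pvInsideB s.1 s.2 field && !((s.1, s.2) == (P.1, P.2))) = false := by
        rw [pv_insideB_eq]
        have hs : ((s.1, s.2) : Int × Int) = s := rfl
        rw [hs]
        by_cases hin : pvIsInside s field = true
        · have hsp : s = P := by
            by_contra hne
            exact hg ⟨hin, hne⟩
          rw [hin, hsp]
          simp
        · rw [Bool.eq_false_iff.mpr hin]
          simp
      rw [if_neg (by rw [hgb]; simp)]
      constructor
      · intro h; cases h
      · rintro ⟨k, hc, hj⟩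
        have h0 := hj 0 (by omega)
        rw [pv_back_zero] at h0
        exact absurd h0 hg

theorem pv_all_of_cell (field : List (List Bool)) (b : Int × Int)
    (h : pvCellAt field b.1 b.2 = true) : pvProc field.length 0 b := by
  obtain ⟨h1, h2, h3, h4⟩ := pv_cell_props field b.1 b.2 h
  refine ⟨b.2.toNat, b.1.toNat, ?_, by omega⟩
  rw [Prod.ext_iff]
  constructor <;> simp [h1, h3]

theorem pv_ray_ne_P (P b e : Int × Int) (t : Nat) (ht : 1 ≤ t)
    (he1 : b.1 - P.1 = (t : Int) * e.1) (he2 : b.2 - P.2 = (t : Int) * e.2)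
    (hene : e ≠ (0, 0)) (i : Nat) : pvRay b e i ≠ P := by
  intro hEq
  apply hene
  rw [Prod.ext_iff] at hEq ⊢
  unfold pvRay at hEq
  simp only [] at hEq
  have h1 : ((t : Int) + (i : Int)) * e.1 = 0 := by rw [add_mul]; linarith [hEq.1]
  have h2 : ((t : Int) + (i : Int)) * e.2 = 0 := by rw [add_mul]; linarith [hEq.2]
  have hco : ((t : Int) + (i : Int)) ≠ 0 := by
    have ht' : (1 : Int) ≤ (t : Int) := by exact_mod_cast ht
    have hi' : (0 : Int) ≤ (i : Int) := by positivity
    omega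
  exact ⟨(mul_eq_zero.mp h1).resolve_left hco, (mul_eq_zero.mp h2).resolve_left hco⟩

theorem pv_walkW_iff_blocked (pos : List Int) (field : List (List Bool))
    (hpre : Pre_calc_visible_asteroids_from pos field) (q : Int × Int)
    (hq : pvCellAt field q.1 q.2 = true) (hqs : pos ≠ [q.1, q.2]) :
    pvWalkW field (pvP0 pos, pvP1 pos) (pvDOf pos q) (pvBack q (pvDOf pos q) 1) ↔
      pvBlocked pos field (pvProc field.length 0) q := by
  have hsub : (q.1 - pvP0 pos, q.2 - pvP1 pos) ≠ ((0 : Int), (0 : Int)) :=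
    pv_ne_P_sub pos field hpre q hq hqs
  have hnd : pvNormalize (q.1 - pvP0 pos, q.2 - pvP1 pos) = pvDOf pos q := rfl
  obtain ⟨s, hs1, hd1, hd2, hprim⟩ := pv_norm_decomp _ hsub
  rw [hnd] at hd1 hd2 hprim
  simp only at hd1 hd2
  set e := pvDOf pos q with he
  have hene : e ≠ (0, 0) := pv_prim_ne_zero e hprim
  have hqin : pvIsInside q field = true := pv_cell_imp_inside field q.1 q.2 hq
  have hbk : ∀ j : Nat, pvBack (pvBack q e 1) e j = pvBack q e (j + 1) := by
    intro j
    rw [pv_back_one, pv_back_shift]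
  constructor
  · rintro ⟨k, hcell, hcond⟩
    rw [hbk k] at hcell
    have hcond' : ∀ j : Nat, 1 ≤ j → j ≤ k + 1 →
        pvIsInside (pvBack q e j) field = true ∧ pvBack q e j ≠ (pvP0 pos, pvP1 pos) := by
      intro j h1 h2
      have hh := hcond (j - 1) (by omega)
      rw [hbk (j - 1)] at hh
      have hjj : j - 1 + 1 = j := by omega
      rw [hjj] at hh
      exact hh
    have hsK : k + 1 < s := by
      by_contra hle
      push_neg at hle
      have hPj := (hcond' s (by omega) (by omega)).2
      apply hPj
      rw [Prod.ext_iff]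
      unfold pvBack
      exact ⟨by simp only []; linarith [hd1], by simp only []; linarith [hd2]⟩
    have hqray : q = pvRay (pvBack q e (k + 1)) e (k + 1) := by
      unfold pvRay pvBack
      rw [Prod.ext_iff]
      exact ⟨by simp only []; ring, by simp only []; ring⟩
    have hcast : ((s - (k + 1) : Nat) : Int) = (s : Int) - ((k + 1 : Nat) : Int) :=
      Int.ofNat_sub (by omega)
    have hb1 : (pvBack q e (k + 1)).1 - pvP0 pos = ((s - (k + 1) : Nat) : Int) * e.1 := by
      unfold pvBack
      simp only [hcast]
      push_cast
      rw [sub_mul]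
      linarith [hd1]
    have hb2 : (pvBack q e (k + 1)).2 - pvP1 pos = ((s - (k + 1) : Nat) : Int) * e.2 := by
      unfold pvBack
      simp only [hcast]
      push_cast
      rw [sub_mul]
      linarith [hd2]
    have hbsub : ((pvBack q e (k + 1)).1 - pvP0 pos, (pvBack q e (k + 1)).2 - pvP1 pos) =
        (((s - (k + 1) : Nat) : Int) * e.1, ((s - (k + 1) : Nat) : Int) * e.2) := by
      rw [Prod.ext_iff]
      exact ⟨hb1, hb2⟩
    have hdofb : pvDOf pos (pvBack q e (k + 1)) = e := by
      unfold pvDOf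
      rw [hbsub]
      exact pv_norm_mul e hprim (s - (k + 1)) (by omega)
    have hbneP : ∀ i : Nat, pvRay (pvBack q e (k + 1)) e i ≠ (pvP0 pos, pvP1 pos) :=
      pv_ray_ne_P (pvP0 pos, pvP1 pos) (pvBack q e (k + 1)) e (s - (k + 1)) (by omega) hb1 hb2 hene
    have hbnpos : pos ≠ [(pvBack q e (k + 1)).1, (pvBack q e (k + 1)).2] := by
      intro hposb
      obtain ⟨hx, hy⟩ := pv_posP pos _ _ hposb
      have := hbneP 0
      rw [pv_ray_zero] at this
      exact this (Prod.ext_iff.mpr ⟨hx.symm, hy.symm⟩)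
    refine ⟨pvBack q e (k + 1), pv_all_of_cell field _ hcell, hcell, hbnpos, ?_⟩
    rw [hdofb]
    refine ⟨k + 1, by omega, hqray, ?_⟩
    intro i h1 h2
    have hri : pvRay (pvBack q e (k + 1)) e i = pvBack q e ((k + 1) - i) := by
      rw [pv_back_ray q (pvBack q e (k + 1)) e (k + 1) ((k + 1) - i) hqray (by omega)]
      congr 1
      omega
    rw [hri]
    by_cases hKi : (k + 1) - i = 0
    · rw [hKi, pv_back_zero]; exact hqin
    · exact (hcond' ((k + 1) - i) (by omega) (by omega)).1
  · rintro ⟨b, hAll, hbcell, hbpos, hbchain⟩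
    have hbne := pv_ne_P_sub pos field hpre b hbcell hbpos
    have hndb : pvNormalize (b.1 - pvP0 pos, b.2 - pvP1 pos) = pvDOf pos b := rfl
    obtain ⟨t, ht1, he1, he2, hprimb⟩ := pv_norm_decomp _ hbne
    rw [hndb] at he1 he2 hprimb
    simp only at he1 he2
    obtain ⟨K, hK1, hqray, hins⟩ := hbchain
    have hq1 : q.1 - pvP0 pos = ((t + K : Nat) : Int) * (pvDOf pos b).1 := by
      rw [hqray]
      unfold pvRay
      simp only []
      push_cast
      rw [add_mul]
      linarith [he1]
    have hq2 : q.2 - pvP1 pos = ((t + K : Nat) : Int) * (pvDOf pos b).2 := by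
      rw [hqray]
      unfold pvRay
      simp only []
      push_cast
      rw [add_mul]
      linarith [he2]
    obtain ⟨hsEq, heEq⟩ := pv_prim_unique e (pvDOf pos b) s (t + K) hprim hprimb hs1 (by omega)
      (by linarith [hd1, hq1]) (by linarith [hd2, hq2])
    refine ⟨K - 1, ?_, ?_⟩
    · have hb1 : pvBack (pvBack q e 1) e (K - 1) = pvBack q e K := by
        rw [hbk (K - 1)]
        congr 1
        omega
      rw [hb1]
      have hbback : pvBack q e K = b := by
        rw [heEq, pv_back_ray q b (pvDOf pos b) K K hqray le_rfl]
        rw [Nat.sub_self, pv_ray_zero]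
      rw [hbback]; exact hbcell
    · intro j hj
      rw [hbk j]
      have hray : pvBack q e (j + 1) = pvRay b (pvDOf pos b) (K - (j + 1)) := by
        rw [heEq]; exact pv_back_ray q b (pvDOf pos b) K (j + 1) hqray (by omega)
      rw [hray]
      refine ⟨?_, ?_⟩
      · by_cases hKi : K - (j + 1) = 0
        · rw [hKi, pv_ray_zero]
          exact pv_cell_imp_inside field b.1 b.2 hbcell
        · exact hins (K - (j + 1)) (by omega) (by omega)
      · exact pv_ray_ne_P (pvP0 pos, pvP1 pos) b (pvDOf pos b) t ht1 he1 he2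
          (pv_prim_ne_zero _ hprimb) (K - (j + 1))

theorem pv_ray_neg (p d : Int × Int) (n : Nat) :
    pvRay p (-d.1, -d.2) n = pvBack p d n := by
  unfold pvRay pvBack
  rw [Prod.ext_iff]
  constructor <;> (simp only []; ring)

-- ---- counting ----

theorem pv_count_sum (l : List Bool) :
    ((l.count true : Nat) : Int) = (l.map (fun v => if v then (1 : Int) else 0)).sum := by
  induction l with
  | nil => rfl
  | cons x xs ih =>
    cases x <;> simp [List.count_cons, ih] <;> ring

theorem pv_sum_eq {α β : Type} (f : α → Int) (g : β → Int) :
    ∀ (l1 : List α) (l2 : List β), l1.length = l2.length →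
    (∀ (i : Nat) (h1 : i < l1.length) (h2 : i < l2.length), f (l1[i]'h1) = g (l2[i]'h2)) →
    (l1.map f).sum = (l2.map g).sum := by
  intro l1
  induction l1 with
  | nil =>
    intro l2 hl _
    cases l2 with
    | nil => rfl
    | cons y ys => cases hl
  | cons x xs ih =>
    intro l2 hl hpt
    cases l2 with
    | nil => cases hl
    | cons y ys =>
      simp only [List.map_cons, List.sum_cons]
      have h0 := hpt 0 (by simp) (by simp)
      simp only [List.getElem_cons_zero] at h0
      rw [h0, ih ys (by simpa using hl) (fun i h1 h2 => by
        have hs := hpt (i + 1) (by simpa using Nat.succ_lt_succ h1)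
          (by simpa using Nat.succ_lt_succ h2)
        simpa only [List.getElem_cons_succ] using hs)]

theorem pv_foldl_if_add {α : Type} (p : α → Bool) (f : α → Int) :
    ∀ (l : List α) (a : Int),
      l.foldl (fun acc x => if p x then acc + f x else acc) a =
        a + (l.map (fun x => if p x then f x else 0)).sum := by
  intro l
  induction l with
  | nil => intro a; simp
  | cons x xs ih =>
    intro a
    simp only [List.foldl_cons, List.map_cons, List.sum_cons]
    by_cases h : p x
    · rw [if_pos h, if_pos h, ih]; ring
    · rw [if_neg h, if_neg h, ih]; ring

theorem pv_foldl_sum {β : Type} (F : Int → β → Int) (G : β → Int)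
    (h : ∀ (a : Int) (x : β), F a x = a + G x) :
    ∀ (l : List β) (a : Int), l.foldl F a = a + (l.map G).sum := by
  intro l
  induction l with
  | nil => intro a; simp
  | cons x xs ih =>
    intro a
    rw [List.foldl_cons, h, ih]
    simp only [List.map_cons, List.sum_cons]
    ring

-- the per-cell equality feeding the sums
theorem pv_cell_final (pos : List Int) (field gF : List (List Bool))
    (hpre : Pre_calc_visible_asteroids_from pos field)
    (hinv : pvInv pos field (pvProc field.length 0) gF)
    (ri ci : Nat) (hri : ri < field.length) (hci : ci < (field.getD ri []).length) :
    (if (gF.getD ri []).getD ci false then (1 : Int) else 0) =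
    (if ((field.getD ri []).getD ci false) && !(pos == [(ci : Int), (ri : Int)]) then
      (if pvWalk ((ci : Int) - PySem.Int.floordiv ((ci : Int) - pvP0 pos) ((Int.gcd ((ci : Int) - pvP0 pos) ((ri : Int) - pvP1 pos) : Nat) : Int))
                 ((ri : Int) - PySem.Int.floordiv ((ri : Int) - pvP1 pos) ((Int.gcd ((ci : Int) - pvP0 pos) ((ri : Int) - pvP1 pos) : Nat) : Int))
                 (PySem.Int.floordiv ((ci : Int) - pvP0 pos) ((Int.gcd ((ci : Int) - pvP0 pos) ((ri : Int) - pvP1 pos) : Nat) : Int))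
                 (PySem.Int.floordiv ((ri : Int) - pvP1 pos) ((Int.gcd ((ci : Int) - pvP0 pos) ((ri : Int) - pvP1 pos) : Nat) : Int))
                 (pvP0 pos) (pvP1 pos) field (pvFuel field) then (1 : Int) else 0)
    else 0) := by
  have hsh := hinv.1
  have hcf : pvCellAt field (ci : Int) (ri : Int) = (field.getD ri []).getD ci false :=
    pv_cell_nat field ri ci hri hci
  have hcg : pvCellAt gF (ci : Int) (ri : Int) = (gF.getD ri []).getD ci false :=
    pv_cell_nat gF ri ci (by rw [hsh.1]; exact hri) (by rw [hsh.2 ri]; exact hci)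
  by_cases hval : (field.getD ri []).getD ci false = true
  · by_cases hstation : pos = [(ci : Int), (ri : Int)]
    · have hbeq : (pos == [(ci : Int), (ri : Int)]) = true := by
        rw [beq_iff_eq]; exact hstation
      rw [hbeq]
      have hproc : pvProc field.length 0 ((ci : Int), (ri : Int)) := ⟨ri, ci, rfl, by omega⟩
      have hgf : ¬ (pvCellAt gF ((ci : Int), (ri : Int)).1 ((ci : Int), (ri : Int)).2 = true) := by
        rw [hinv.2]
        rintro ⟨_, hst, _⟩
        exact hst ⟨hstation, hproc⟩
      simp only [] at hgf
      rw [hcg] at hgf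
      rw [if_neg hgf]
      simp
    · have hcell : pvCellAt field (ci : Int) (ri : Int) = true := by rw [hcf]; exact hval
      have hbeq : (pos == [(ci : Int), (ri : Int)]) = false := by
        rw [beq_eq_false_iff_ne]; exact hstation
      rw [hbeq, hval]
      simp only [Bool.not_false, Bool.and_self, if_true]
      have hsub : (((ci : Int), (ri : Int)).1 - pvP0 pos, (((ci : Int), (ri : Int))).2 - pvP1 pos) ≠
          ((0 : Int), (0 : Int)) := pv_ne_P_sub pos field hpre _ hcell hstation
      have hgne : Int.gcd ((ci : Int) - pvP0 pos) ((ri : Int) - pvP1 pos) ≠ 0 := by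
        intro h0
        rcases Int.gcd_eq_zero_iff.mp h0 with ⟨h1, h2⟩
        apply hsub
        rw [Prod.ext_iff]
        exact ⟨h1, h2⟩
      have hgpos : (0 : Int) < ((Int.gcd ((ci : Int) - pvP0 pos) ((ri : Int) - pvP1 pos) : Nat) : Int) := by
        exact_mod_cast Nat.pos_of_ne_zero hgne
      have hdx : PySem.Int.floordiv ((ci : Int) - pvP0 pos)
          ((Int.gcd ((ci : Int) - pvP0 pos) ((ri : Int) - pvP1 pos) : Nat) : Int) =
          (pvDOf pos ((ci : Int), (ri : Int))).1 := by
        have hne := pv_norm_eq ((ci : Int) - pvP0 pos, (ri : Int) - pvP1 pos) hsub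
        have : pvDOf pos ((ci : Int), (ri : Int)) =
            (((ci : Int) - pvP0 pos) / ((Int.gcd ((ci : Int) - pvP0 pos) ((ri : Int) - pvP1 pos) : Nat) : Int),
             (((ri : Int) - pvP1 pos) / ((Int.gcd ((ci : Int) - pvP0 pos) ((ri : Int) - pvP1 pos) : Nat) : Int))) := hne
        rw [this]
        exact PySem.Int.floordiv_eq_ediv_of_pos hgpos
      have hdy : PySem.Int.floordiv ((ri : Int) - pvP1 pos)
          ((Int.gcd ((ci : Int) - pvP0 pos) ((ri : Int) - pvP1 pos) : Nat) : Int) =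
          (pvDOf pos ((ci : Int), (ri : Int))).2 := by
        have hne := pv_norm_eq ((ci : Int) - pvP0 pos, (ri : Int) - pvP1 pos) hsub
        have : pvDOf pos ((ci : Int), (ri : Int)) =
            (((ci : Int) - pvP0 pos) / ((Int.gcd ((ci : Int) - pvP0 pos) ((ri : Int) - pvP1 pos) : Nat) : Int),
             (((ri : Int) - pvP1 pos) / ((Int.gcd ((ci : Int) - pvP0 pos) ((ri : Int) - pvP1 pos) : Nat) : Int))) := hne
        rw [this]
        exact PySem.Int.floordiv_eq_ediv_of_pos hgpos
      rw [hdx, hdy]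
      -- fuel sufficiency for the walk
      have hdne : pvDOf pos ((ci : Int), (ri : Int)) ≠ (0, 0) := by
        obtain ⟨m, hm, ha, hb, hprim⟩ := pv_norm_decomp _ hsub
        exact pv_prim_ne_zero _ hprim
      have hdneg : ((-(pvDOf pos ((ci : Int), (ri : Int))).1, -(pvDOf pos ((ci : Int), (ri : Int))).2) :
          Int × Int) ≠ (0, 0) := by
        intro h
        rw [Prod.ext_iff] at h
        simp only [] at h
        apply hdne
        rw [Prod.ext_iff]
        constructor <;> omega
      obtain ⟨n, hn1, hn2, hn3⟩ := pv_escape field _ hdneg ((ci : Int), (ri : Int))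
      rw [pv_ray_neg] at hn3
      have hstop : ¬(pvIsInside (pvBack ((((ci : Int), (ri : Int)) : Int × Int).1 -
          (pvDOf pos ((ci : Int), (ri : Int))).1,
          (((ci : Int), (ri : Int)) : Int × Int).2 - (pvDOf pos ((ci : Int), (ri : Int))).2)
          (pvDOf pos ((ci : Int), (ri : Int))) (n - 1)) field = true ∧
          pvBack ((((ci : Int), (ri : Int)) : Int × Int).1 - (pvDOf pos ((ci : Int), (ri : Int))).1,
          (((ci : Int), (ri : Int)) : Int × Int).2 - (pvDOf pos ((ci : Int), (ri : Int))).2)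
          (pvDOf pos ((ci : Int), (ri : Int))) (n - 1) ≠ (pvP0 pos, pvP1 pos)) := by
        rw [pv_back_shift]
        have hnn : n - 1 + 1 = n := by omega
        rw [hnn]
        rintro ⟨hi, _⟩
        rw [hi] at hn3; cases hn3
      have hwc := pv_walk_char field (pvP0 pos, pvP1 pos) (pvDOf pos ((ci : Int), (ri : Int)))
        (pvFuel field) (n - 1)
        ((((ci : Int), (ri : Int)) : Int × Int).1 - (pvDOf pos ((ci : Int), (ri : Int))).1,
         (((ci : Int), (ri : Int)) : Int × Int).2 - (pvDOf pos ((ci : Int), (ri : Int))).2)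
        (by omega) hstop
      dsimp only at hwc
      have hblk := pv_walkW_iff_blocked pos field hpre ((ci : Int), (ri : Int)) hcell hstation
      rw [pv_back_one] at hblk
      dsimp only at hblk
      by_cases hbl : pvBlocked pos field (pvProc field.length 0) ((ci : Int), (ri : Int))
      · have hgf : ¬ (pvCellAt gF ((ci : Int), (ri : Int)).1 ((ci : Int), (ri : Int)).2 = true) := by
          rw [hinv.2]
          rintro ⟨_, _, hb⟩
          exact hb hbl
        simp only [] at hgf
        rw [hcg] at hgf
        rw [if_neg hgf]
        have hwfalse := hwc.mpr (hblk.mpr hbl)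
        rw [hwfalse]
        simp
      · have hgf : pvCellAt gF ((ci : Int), (ri : Int)).1 ((ci : Int), (ri : Int)).2 = true := by
          rw [hinv.2]
          exact ⟨hcell, fun hxy => hstation hxy.1, hbl⟩
        simp only [] at hgf
        rw [hcg] at hgf
        rw [if_pos hgf]
        have hwtrue : pvWalk ((ci : Int) - (pvDOf pos ((ci : Int), (ri : Int))).1)
            ((ri : Int) - (pvDOf pos ((ci : Int), (ri : Int))).2)
            (pvDOf pos ((ci : Int), (ri : Int))).1 (pvDOf pos ((ci : Int), (ri : Int))).2
            (pvP0 pos) (pvP1 pos) field (pvFuel field) = true := by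
          rcases Bool.eq_false_or_eq_true (pvWalk ((ci : Int) - (pvDOf pos ((ci : Int), (ri : Int))).1)
            ((ri : Int) - (pvDOf pos ((ci : Int), (ri : Int))).2)
            (pvDOf pos ((ci : Int), (ri : Int))).1 (pvDOf pos ((ci : Int), (ri : Int))).2
            (pvP0 pos) (pvP1 pos) field (pvFuel field)) with ht | hf
          · exact ht
          · exact absurd (hblk.mp (hwc.mp hf)) hbl
        rw [hwtrue]
        simp
  · have hvb : (field.getD ri []).getD ci false = false := Bool.eq_false_iff.mpr hval
    have hgf : ¬ (pvCellAt gF ((ci : Int), (ri : Int)).1 ((ci : Int), (ri : Int)).2 = true) := by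
      rw [hinv.2]
      rintro ⟨hcfq, _, _⟩
      simp only [] at hcfq
      rw [hcf] at hcfq
      exact hval hcfq
    simp only [] at hgf
    rw [hcg] at hgf
    rw [if_neg hgf, hvb]
    simp

-- ===== VERDICT (by name: the statement is the Claim_ definition above) =====
theorem calc_visible_asteroids_from_spec : Claim_equal_calc_visible_asteroids_from := by
  intro pos field hdom hpre
  unfold Spec_calc_visible_asteroids_from
  show calc_visible_asteroids_from pos field = calc_visible_asteroids_from_alt pos field
  have hA : calc_visible_asteroids_from pos field =
      ((List.range field.length).foldl (fun va row =>
        (List.range ((va.getD row []).length)).foldl (fun va2 col =>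
          if (va2.getD row []).getD col false then
            if pos = [(col : Int), (row : Int)] then pvSetFalse va2 ((col : Int), (row : Int))
            else
              pvDarkenFrom ((col : Int), (row : Int)) va2
                (pvNormalize ((col : Int) - (PySem.List.pyGet? pos 0).getD 0,
                              (row : Int) - (PySem.List.pyGet? pos 1).getD 0)) (pvFuel field)
          else va2) va) field).foldl (fun s r => s + (r.count true : Int)) 0 := rfl
  have hB : calc_visible_asteroids_from_alt pos field =
      (PySem.List.enumerate field 0).foldl (fun count rrow =>
        (PySem.List.enumerate rrow.2 0).foldl (fun count cv =>
          if cv.2 && !(pos == [cv.1, rrow.1]) then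
            count +
              (if pvWalk (cv.1 - PySem.Int.floordiv (cv.1 - pvP0 pos) ((Int.gcd (cv.1 - pvP0 pos) (rrow.1 - pvP1 pos) : Nat) : Int))
                         (rrow.1 - PySem.Int.floordiv (rrow.1 - pvP1 pos) ((Int.gcd (cv.1 - pvP0 pos) (rrow.1 - pvP1 pos) : Nat) : Int))
                         (PySem.Int.floordiv (cv.1 - pvP0 pos) ((Int.gcd (cv.1 - pvP0 pos) (rrow.1 - pvP1 pos) : Nat) : Int))
                         (PySem.Int.floordiv (rrow.1 - pvP1 pos) ((Int.gcd (cv.1 - pvP0 pos) (rrow.1 - pvP1 pos) : Nat) : Int))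
                         (pvP0 pos) (pvP1 pos) field (pvFuel field) then 1 else 0)
          else count) count) 0 := rfl
  rw [hA, hB]
  have hinv := pv_outer pos field hpre field.length le_rfl
  have hsh := hinv.1
  rw [PySem.List.foldl_add]
  have hBsum : (PySem.List.enumerate field 0).foldl (fun count rrow =>
        (PySem.List.enumerate rrow.2 0).foldl (fun count cv =>
          if cv.2 && !(pos == [cv.1, rrow.1]) then
            count +
              (if pvWalk (cv.1 - PySem.Int.floordiv (cv.1 - pvP0 pos) ((Int.gcd (cv.1 - pvP0 pos) (rrow.1 - pvP1 pos) : Nat) : Int))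
                         (rrow.1 - PySem.Int.floordiv (rrow.1 - pvP1 pos) ((Int.gcd (cv.1 - pvP0 pos) (rrow.1 - pvP1 pos) : Nat) : Int))
                         (PySem.Int.floordiv (cv.1 - pvP0 pos) ((Int.gcd (cv.1 - pvP0 pos) (rrow.1 - pvP1 pos) : Nat) : Int))
                         (PySem.Int.floordiv (rrow.1 - pvP1 pos) ((Int.gcd (cv.1 - pvP0 pos) (rrow.1 - pvP1 pos) : Nat) : Int))
                         (pvP0 pos) (pvP1 pos) field (pvFuel field) then 1 else 0)
          else count) count) 0 =
      0 + ((PySem.List.enumerate field 0).map (fun rrow =>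
        ((PySem.List.enumerate rrow.2 0).map (fun cv =>
          if cv.2 && !(pos == [cv.1, rrow.1]) then
            (if pvWalk (cv.1 - PySem.Int.floordiv (cv.1 - pvP0 pos) ((Int.gcd (cv.1 - pvP0 pos) (rrow.1 - pvP1 pos) : Nat) : Int))
                         (rrow.1 - PySem.Int.floordiv (rrow.1 - pvP1 pos) ((Int.gcd (cv.1 - pvP0 pos) (rrow.1 - pvP1 pos) : Nat) : Int))
                         (PySem.Int.floordiv (cv.1 - pvP0 pos) ((Int.gcd (cv.1 - pvP0 pos) (rrow.1 - pvP1 pos) : Nat) : Int))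
                         (PySem.Int.floordiv (rrow.1 - pvP1 pos) ((Int.gcd (cv.1 - pvP0 pos) (rrow.1 - pvP1 pos) : Nat) : Int))
                         (pvP0 pos) (pvP1 pos) field (pvFuel field) then (1 : Int) else 0)
          else 0)).sum)).sum :=
    pv_foldl_sum _ _ (fun a rrow => pv_foldl_if_add _ _ (PySem.List.enumerate rrow.2 0) a) _ 0
  rw [hBsum]
  simp only [zero_add]
  apply pv_sum_eq
  · rw [PySem.List.length_enumerate, hsh.1]
  · intro i h1 h2
    have hif : i < field.length := by
      rw [PySem.List.length_enumerate] at h2; exact_mod_cast h2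
    rw [PySem.List.getElem_enumerate]
    simp only [zero_add]
    rw [pv_count_sum]
    apply pv_sum_eq
    · rw [PySem.List.length_enumerate]
      have hlen := hsh.2 i
      rw [List.getD_eq_getElem _ [] h1, List.getD_eq_getElem _ [] hif] at hlen
      exact hlen
    · intro ci hc1 hc2
      rw [PySem.List.getElem_enumerate]
      simp only [zero_add]
      have hcif : ci < (field.getD i []).length := by
        rw [PySem.List.length_enumerate] at hc2
        rw [List.getD_eq_getElem _ [] hif]
        exact_mod_cast hc2
      have hcell := pv_cell_final pos field _ hpre hinv i ci hif hcif
      rw [List.getD_eq_getElem _ [] h1, List.getD_eq_getElem _ [] hif] at hcell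
      rw [List.getD_eq_getElem _ false hc1] at hcell
      rw [List.getD_eq_getElem _ false (by rw [← List.getD_eq_getElem _ [] hif]; exact hcif)] at hcell
      exact hcell
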